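-- pv_equiv track=rewrite | github.com/CraiceMiller/learning | Python/python-server/mypython/utils.py | binarySearchDict
-- ===== SOURCE A (Python) =====
-- from typing import (Callable, Coroutine, Any, Iterable, Mapping,TypeVar)
--
-- Value = TypeVar("Value")
--
-- def binarySearchDict(dictionaries:list[dict[str,Any]],
--                      target:Value,
--                      key:str,
--                      key2:str|None = None,
--                      key3:str|None = None,
--                       /)->int:
--     """
--     Performs a binary search on a sorted list of dictionaries.
--
--     NOTE: The list of dictionaries MUST be sorted by the given 'key'
--     before calling this function.
--
--
--     """
--
--
--     start:int=0
--     end:int=len(dictionaries)-1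
--
--     while start <= end:
--         mid:int= (start + end) // 2
--
--         try:
--             if (key2 is not None):
--                 middle_value = dictionaries[mid][key][key2]
--             elif (key2 is not None and key3 is not None):
--                 middle_value = dictionaries[mid][key][key2][key3]
--             else:
--                 middle_value = dictionaries[mid][key]
--
--         except KeyError:
--             return -1
--
--         if middle_value == target: return mid
--
--         if middle_value < target: start = mid +1
--
--         else: end = mid -1
--
--
--     return -1
-- ===== SOURCE B (Python) =====
-- def binarySearchDict(dictionaries, target, key, key2=None, key3=None, /):
--     """Recursive binary search on list slices with a base offset (key3 is accepted
--     but unused, as in the original where its branch is unreachable)."""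
--     def search(seg, base):
--         if not seg:
--             return -1
--         m = (len(seg) - 1) // 2
--         d = seg[m]
--         if key not in d:
--             return -1
--         v = d[key] if key2 is None else d[key][key2]
--         if v == target:
--             return base + m
--         if v < target:
--             return search(seg[m + 1:], base + m + 1)
--         return search(seg[:m], base)
--     return search(dictionaries, 0)
-- ===== Notes on version B (the rewrite author's own statement) =====
-- stated objective: alternative
-- what changed: Replaces A's iterative start/end index loop over the whole list by a recursive search over list slices carried with a base offset (seg[:m] / seg[m+1:]), with a membership test instead of try/except.
import Mathlib
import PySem

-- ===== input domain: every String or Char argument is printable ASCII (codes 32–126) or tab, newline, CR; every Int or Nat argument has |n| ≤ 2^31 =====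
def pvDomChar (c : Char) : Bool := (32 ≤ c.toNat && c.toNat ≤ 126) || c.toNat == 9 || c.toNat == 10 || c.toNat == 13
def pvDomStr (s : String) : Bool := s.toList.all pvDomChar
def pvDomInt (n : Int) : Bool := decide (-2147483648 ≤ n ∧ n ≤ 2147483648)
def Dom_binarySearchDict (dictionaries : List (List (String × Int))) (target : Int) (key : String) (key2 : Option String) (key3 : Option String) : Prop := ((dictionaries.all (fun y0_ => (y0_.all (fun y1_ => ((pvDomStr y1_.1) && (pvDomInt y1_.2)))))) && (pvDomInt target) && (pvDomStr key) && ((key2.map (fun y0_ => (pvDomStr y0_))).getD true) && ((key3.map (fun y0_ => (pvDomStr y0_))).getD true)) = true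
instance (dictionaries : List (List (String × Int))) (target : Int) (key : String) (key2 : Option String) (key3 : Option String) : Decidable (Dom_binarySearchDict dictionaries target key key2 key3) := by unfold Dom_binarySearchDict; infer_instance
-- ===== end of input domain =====

-- B replaces A's iterative start/end index loop by structural recursion on list
-- slices carried with a base offset (objective: alternative decomposition, same cost class).

-- ===== PORT A =====
-- dict lookup d[key] on the association list: first matching pair (Python dict semantics)
def pvLookup (d : List (String × Int)) (key : String) : Option Int :=
  List.lookup key d

-- the while-loop of A, recursing on the shrinking interval [start, end_]
def binarySearchDictLoop (dictionaries : List (List (String × Int))) (target : Int)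
    (key : String) (key2 : Option String) (start end_ : Int) : Int :=
  if h : start ≤ end_ then
    let mid := PySem.Int.floordiv (start + end_) 2
    -- dictionaries[mid]: mid is always in range here, so getD [] is exact
    let d := (PySem.List.pyGet? dictionaries mid).getD []
    match key2, pvLookup d key with
    | _, none => -1              -- KeyError caught: return -1
    | some _, some _ => -1       -- Python raises TypeError (int[str]), uncaught: outside Pre_
    | none, some v =>
      if v = target then mid
      else if v < target then binarySearchDictLoop dictionaries target key key2 (mid + 1) end_
      else binarySearchDictLoop dictionaries target key key2 start (mid - 1)
  else -1
termination_by (end_ + 1 - start).toNat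
decreasing_by
  all_goals
    have hb := PySem.Int.floordiv_two_mid_bounds (lo := start) (hi := end_) h
    omega

def binarySearchDict (dictionaries : List (List (String × Int))) (target : Int) (key : String) (key2 : Option String) (key3 : Option String) : Int :=
  binarySearchDictLoop dictionaries target key key2 0 (dictionaries.length - 1)

-- ===== PORT B =====
-- Source B's inner `search(seg, base)`: recursion on slices; seg[m+1:] / seg[:m] have
-- nonnegative in-range bounds, so List.drop / List.take are exact ports of the slices.
def searchSeg (target : Int) (key : String) (key2 : Option String)
    (seg : List (List (String × Int))) (base : Int) : Int :=
  if hseg : seg = [] then -1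
  else
    let m := (seg.length - 1) / 2
    let d := seg.getD m []
    match pvLookup d key with
    | none => -1
    | some v =>
      match key2 with
      | some _ => -1             -- Python raises TypeError here (d[key][key2]); outside Pre_
      | none =>
        if v = target then base + m
        else if v < target then searchSeg target key key2 (seg.drop (m + 1)) (base + m + 1)
        else searchSeg target key key2 (seg.take m) base
termination_by seg.length
decreasing_by
  · have : seg.length ≠ 0 := fun h => hseg (List.eq_nil_of_length_eq_zero h)
    simp; omega
  · have : seg.length ≠ 0 := fun h => hseg (List.eq_nil_of_length_eq_zero h)
    simp [List.length_take]; omega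

def binarySearchDict_alt (dictionaries : List (List (String × Int))) (target : Int) (key : String) (key2 : Option String) (key3 : Option String) : Int :=
  searchSeg target key key2 dictionaries 0

-- ===== PRECONDITION & SPEC =====
-- Pre_ excludes exactly the inputs where A raises an uncaught TypeError: key2 given and
-- the first probed dictionary (index (len-1)//2) does contain `key`, so d[key][key2]
-- indexes an int with a string. A returns on everything else.
def Pre_binarySearchDict (dictionaries : List (List (String × Int))) (target : Int) (key : String) (key2 : Option String) (key3 : Option String) : Prop :=
  ∀ s, key2 = some s →
    pvLookup (dictionaries.getD ((dictionaries.length - 1) / 2) []) key = none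

instance (dictionaries : List (List (String × Int))) (target : Int) (key : String) (key2 : Option String) (key3 : Option String) : Decidable (Pre_binarySearchDict dictionaries target key key2 key3) := by unfold Pre_binarySearchDict; infer_instance

def pvWitness_binarySearchDict : (List (List (String × Int))) × Int × String × Option String × Option String :=
  ([[("a", 1)], [("a", 3)], [("a", 7)]], 3, "a", none, none)

def Spec_binarySearchDict (dictionaries : List (List (String × Int))) (target : Int) (key : String) (key2 : Option String) (key3 : Option String) (out : Int) : Prop := out = binarySearchDict_alt dictionaries target key key2 key3
instance (dictionaries : List (List (String × Int))) (target : Int) (key : String) (key2 : Option String) (key3 : Option String) (out : Int) : Decidable (Spec_binarySearchDict dictionaries target key key2 key3 out) := by unfold Spec_binarySearchDict; infer_instance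

-- ===== CLAIM (what is proved, stated in full; the proofs are below) =====
def Claim_equal_binarySearchDict : Prop := ∀ (dictionaries : List (List (String × Int))) (target : Int) (key : String) (key2 : Option String) (key3 : Option String), Dom_binarySearchDict dictionaries target key key2 key3 → Pre_binarySearchDict dictionaries target key key2 key3 → Spec_binarySearchDict dictionaries target key key2 key3 (binarySearchDict dictionaries target key key2 key3)

-- ===== LEMMAS AND PROOFS =====

-- The two recursions visit the same probes: A's interval [lo, hi] corresponds to B's
-- slice (dictionaries.drop lo.toNat).take (hi + 1 - lo).toNat with base lo.
theorem loop_eq_searchSeg (dictionaries : List (List (String × Int))) (target : Int)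
    (key : String) (n : Nat) :
    ∀ lo hi : Int, (hi + 1 - lo).toNat ≤ n → 0 ≤ lo → hi < dictionaries.length →
      binarySearchDictLoop dictionaries target key none lo hi =
        searchSeg target key none ((dictionaries.drop lo.toNat).take (hi + 1 - lo).toNat) lo := by
  induction n with
  | zero =>
    intro lo hi hn hlo hhi
    have hgt : hi < lo := by omega
    rw [binarySearchDictLoop, searchSeg]
    have h1 : ¬ lo ≤ hi := by omega
    have h2 : (hi + 1 - lo).toNat = 0 := by omega
    simp [h1, h2]
  | succ n ih =>
    intro lo hi hn hlo hhi
    by_cases hle : lo ≤ hi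
    · rw [binarySearchDictLoop, searchSeg]
      have hfd : PySem.Int.floordiv (lo + hi) 2 = (lo + hi) / 2 :=
        PySem.Int.floordiv_eq_ediv_of_pos (by omega)
      rw [hfd]
      generalize hgen : (lo + hi) / 2 = mid
      have hb : lo ≤ mid ∧ mid ≤ hi := by omega
      -- the slice is nonempty
      have hlen : ((dictionaries.drop lo.toNat).take (hi + 1 - lo).toNat).length
          = (hi + 1 - lo).toNat := by
        simp [List.length_take, List.length_drop]; omega
      have hne : ¬ ((dictionaries.drop lo.toNat).take (hi + 1 - lo).toNat) = [] := by
        intro h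
        have := congrArg List.length h
        simp [hlen] at this
        omega
      simp only [hle, hne, dif_pos, dif_neg, not_false_iff]
      -- relative midpoint
      have hm : (((dictionaries.drop lo.toNat).take (hi + 1 - lo).toNat).length - 1) / 2
          = (mid - lo).toNat := by
        rw [hlen]; omega
      rw [hm]
      -- the probed dictionary is the same
      have hpg : PySem.List.pyGet? dictionaries mid = dictionaries[mid.toNat]? :=
        PySem.List.pyGet?_of_nonneg (xs := dictionaries) (i := mid) (by omega)
      have hdeq : ((dictionaries.drop lo.toNat).take (hi + 1 - lo).toNat).getD
            (mid - lo).toNat []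
          = (PySem.List.pyGet? dictionaries mid).getD [] := by
        rw [hpg]
        have hmlt : (mid - lo).toNat < (hi + 1 - lo).toNat := by omega
        rw [List.getD_eq_getElem?_getD]
        rw [List.getElem?_take_of_lt hmlt, List.getElem?_drop]
        have hidx : lo.toNat + (mid - lo).toNat = mid.toNat := by omega
        rw [hidx]
      rw [hdeq]
      cases hcase : pvLookup ((PySem.List.pyGet? dictionaries mid).getD []) key with
      | none => simp
      | some v =>
        simp only []
        by_cases hvt : v = target
        · simp only [hvt, if_pos]
          omega
        · by_cases hvlt : v < target
          · simp only [hvt, if_false, hvlt, if_pos]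
            rw [ih (mid + 1) hi (by omega) (by omega) hhi]
            have hdrop : ((dictionaries.drop lo.toNat).take (hi + 1 - lo).toNat).drop
                  ((mid - lo).toNat + 1)
                = (dictionaries.drop (mid + 1).toNat).take (hi + 1 - (mid + 1)).toNat := by
              rw [List.drop_take, List.drop_drop]
              congr 1
              · omega
              · congr 1
                omega
            rw [hdrop]
            congr 1
            omega
          · simp only [hvt, if_false, hvlt, if_false]
            rw [ih lo (mid - 1) (by omega) hlo (by omega)]
            have htake : ((dictionaries.drop lo.toNat).take (hi + 1 - lo).toNat).take
                  (mid - lo).toNat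
                = (dictionaries.drop lo.toNat).take (mid - 1 + 1 - lo).toNat := by
              rw [List.take_take]
              congr 1
              omega
            rw [htake]
    · rw [binarySearchDictLoop, searchSeg]
      have h2 : (hi + 1 - lo).toNat = 0 := by omega
      simp [hle, h2]

-- ===== VERDICT (by name: the statement is the Claim_ definition above) =====
theorem binarySearchDict_spec : Claim_equal_binarySearchDict := by
  intro dictionaries target key key2 key3 _ hpre
  unfold Spec_binarySearchDict binarySearchDict binarySearchDict_alt
  cases key2 with
  | none =>
    have h := loop_eq_searchSeg dictionaries target key
      ((dictionaries.length - 1 : Int) + 1 - 0).toNat 0 (dictionaries.length - 1)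
      (le_refl _) (le_refl 0) (by omega)
    have harg : ((dictionaries.drop (0:Int).toNat).take
        (((dictionaries.length:Int) - 1) + 1 - 0).toNat) = dictionaries := by
      simp
    rw [h, harg]
  | some s =>
    have hpre' := hpre s rfl
    rw [binarySearchDictLoop, searchSeg]
    by_cases hnil : dictionaries = []
    · simp [hnil]
    · have hlen : 0 < dictionaries.length := List.length_pos_of_ne_nil hnil
      have hle : (0 : Int) ≤ dictionaries.length - 1 := by omega
      have hmid : PySem.Int.floordiv (0 + (dictionaries.length - 1)) 2
          = ((dictionaries.length - 1) / 2 : Nat) := by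
        rw [PySem.Int.floordiv_eq_ediv_of_pos (by omega)]
        omega
      have hget : (PySem.List.pyGet? dictionaries
            (PySem.Int.floordiv (0 + (dictionaries.length - 1)) 2)).getD []
          = dictionaries.getD ((dictionaries.length - 1) / 2) [] := by
        rw [hmid, PySem.List.pyGet?_natCast]
        rfl
      simp only [hle, dif_pos, hnil, dif_neg, not_false_iff, hget, hpre']
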